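-- pv_equiv track=rewrite | github.com/analogdevicesinc/pyadi-dt | adidt/xsa/builders/ad9081.py | _converter_select_tx
-- ===== SOURCE A (Python) =====
-- def _converter_select_tx(tx_m: int, tx_link_mode: int) -> str:
--     """Return the ``adi,converter-select`` phandle list for AD9081 TX."""
--     if tx_link_mode == 17 and tx_m == 4:
--         return (
--             "<&ad9081_tx_fddc_chan0 0>, <&ad9081_tx_fddc_chan0 1>, "
--             "<&ad9081_tx_fddc_chan1 0>, <&ad9081_tx_fddc_chan1 1>"
--         )
--     if tx_m >= 8:
--         return (
--             "<&ad9081_tx_fddc_chan0 0>, <&ad9081_tx_fddc_chan0 1>, "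
--             "<&ad9081_tx_fddc_chan1 0>, <&ad9081_tx_fddc_chan1 1>, "
--             "<&ad9081_tx_fddc_chan2 0>, <&ad9081_tx_fddc_chan2 1>, "
--             "<&ad9081_tx_fddc_chan3 0>, <&ad9081_tx_fddc_chan3 1>"
--         )
--     return ", ".join(
--         f"<&ad9081_tx_fddc_chan{i} 0>" for i in range(max(1, min(tx_m, 8)))
--     )
-- ===== SOURCE B (Python) =====
-- def _converter_select_tx(tx_m: int, tx_link_mode: int) -> str:
--     """Return the ``adi,converter-select`` phandle list for AD9081 TX."""
--     if tx_link_mode == 17 and tx_m == 4: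
--         n, idxs = 2, (0, 1)
--     elif tx_m >= 8:
--         n, idxs = 4, (0, 1)
--     else:
--         n, idxs = max(1, min(tx_m, 8)), (0,)
--     return ", ".join(
--         f"<&ad9081_tx_fddc_chan{i} {j}>" for i in range(n) for j in idxs
--     )
-- ===== Notes on version B (the rewrite author's own statement) =====
-- stated objective: simpler
-- what changed: The three hand-written return branches are collapsed into one parameterised generator: a single (n, idxs) selection followed by one nested join over range(n) x idxs replaces the two hard-coded literal strings and the separate comprehension.
import Mathlib
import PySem

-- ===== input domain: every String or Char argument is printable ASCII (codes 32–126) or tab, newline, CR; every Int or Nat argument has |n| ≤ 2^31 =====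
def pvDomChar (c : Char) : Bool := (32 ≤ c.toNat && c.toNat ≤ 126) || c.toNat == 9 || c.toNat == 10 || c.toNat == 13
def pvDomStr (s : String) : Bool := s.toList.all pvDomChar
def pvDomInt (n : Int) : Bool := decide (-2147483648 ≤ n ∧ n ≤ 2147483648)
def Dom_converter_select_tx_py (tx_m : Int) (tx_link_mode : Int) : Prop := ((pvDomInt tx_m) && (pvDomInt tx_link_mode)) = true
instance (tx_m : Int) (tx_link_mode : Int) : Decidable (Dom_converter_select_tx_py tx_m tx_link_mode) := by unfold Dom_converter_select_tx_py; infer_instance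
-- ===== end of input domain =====

set_option maxRecDepth 8192
set_option maxHeartbeats 1600000


-- B collapses A's three hand-written return branches into one parameterised
-- (n, idxs) selection followed by a single nested join (objective: simpler).

-- ===== PORT A =====
def converter_select_tx_py (tx_m : Int) (tx_link_mode : Int) : String :=
  if tx_link_mode = 17 ∧ tx_m = 4 then
    "<&ad9081_tx_fddc_chan0 0>, <&ad9081_tx_fddc_chan0 1>, <&ad9081_tx_fddc_chan1 0>, <&ad9081_tx_fddc_chan1 1>"
  else if tx_m ≥ 8 then
    "<&ad9081_tx_fddc_chan0 0>, <&ad9081_tx_fddc_chan0 1>, <&ad9081_tx_fddc_chan1 0>, <&ad9081_tx_fddc_chan1 1>, <&ad9081_tx_fddc_chan2 0>, <&ad9081_tx_fddc_chan2 1>, <&ad9081_tx_fddc_chan3 0>, <&ad9081_tx_fddc_chan3 1>"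
  else
    PySem.Str.join ", "
      ((PySem.List.pyRange 0 (max 1 (min tx_m 8)) 1).map
        (fun i => "<&ad9081_tx_fddc_chan" ++ PySem.Int.toStr i ++ " 0>"))

-- ===== PORT B =====
def converter_select_tx_py_alt (tx_m : Int) (tx_link_mode : Int) : String :=
  let p : Int × List Int :=
    if tx_link_mode = 17 ∧ tx_m = 4 then (2, [0, 1])
    else if tx_m ≥ 8 then (4, [0, 1])
    else (max 1 (min tx_m 8), [0])
  PySem.Str.join ", "
    ((PySem.List.pyRange 0 p.1 1).flatMap
      (fun i => p.2.map
        (fun j => "<&ad9081_tx_fddc_chan" ++ PySem.Int.toStr i ++ " " ++ PySem.Int.toStr j ++ ">")))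

-- ===== PRECONDITION & SPEC =====
def Spec_converter_select_tx_py (tx_m : Int) (tx_link_mode : Int) (out : String) : Prop := out = converter_select_tx_py_alt tx_m tx_link_mode
instance (tx_m : Int) (tx_link_mode : Int) (out : String) : Decidable (Spec_converter_select_tx_py tx_m tx_link_mode out) := by unfold Spec_converter_select_tx_py; infer_instance

-- ===== CLAIM (what is proved, stated in full; the proofs are below) =====
def Claim_equal_converter_select_tx_py : Prop := ∀ (tx_m : Int) (tx_link_mode : Int), Dom_converter_select_tx_py tx_m tx_link_mode → Spec_converter_select_tx_py tx_m tx_link_mode (converter_select_tx_py tx_m tx_link_mode)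

-- ===== LEMMAS AND PROOFS =====

-- the third branch depends on tx_m only through the clamp value k = max 1 (min tx_m 8)
theorem converter_tail_eq (k : Int) (h1 : 1 ≤ k) (h2 : k ≤ 8) :
    PySem.Str.join ", "
      ((PySem.List.pyRange 0 k 1).map
        (fun i => "<&ad9081_tx_fddc_chan" ++ PySem.Int.toStr i ++ " 0>"))
    = PySem.Str.join ", "
      ((PySem.List.pyRange 0 k 1).flatMap
        (fun i => [0].map
          (fun j => "<&ad9081_tx_fddc_chan" ++ PySem.Int.toStr i ++ " " ++ PySem.Int.toStr j ++ ">"))) := by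
  interval_cases k <;> decide

-- ===== VERDICT (by name: the statement is the Claim_ definition above) =====
theorem converter_select_tx_py_spec : Claim_equal_converter_select_tx_py := by
  intro tx_m tx_link_mode _
  unfold Spec_converter_select_tx_py converter_select_tx_py converter_select_tx_py_alt
  split_ifs with h1 h2
  · decide
  · decide
  · have hk1 : (1 : Int) ≤ max 1 (min tx_m 8) := le_max_left _ _
    have hk2 : max 1 (min tx_m 8) ≤ 8 := by omega
    exact converter_tail_eq _ hk1 hk2
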